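-- pv_equiv track=rewrite | github.com/srgarcess/CodeDrop | python_questions/xy_interval.py | get_possible_values_es
-- ===== SOURCE A (Python) =====
-- def get_possible_values_es(L, R, N):
--     results = []
--     if R == 0:
--         return [[0, 0]] if L == 0 else []
--     for x in range(N):
--         val_5_x = 5**x
--         # Early exit for the outer loop: if 5^x alone already exceeds R,
--         # then any subsequent 5^x * 3^y (where y >= 0) will also exceed R.
--         if val_5_x > R:
--             break
--         for y in range(N):
--             current_value = val_5_x * (3**y)
--             # Early exit for the inner loop: if current_value exceeds R,
--             # then any subsequent 5^x * 3^(y+1) will also exceed R (for the same x).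
--             if current_value > R:
--                 break
--             if L <= current_value <= R:
--                 results.append([x, y])
--     return results
-- ===== SOURCE B (Python) =====
-- def _ilog(b, v):
--     """Largest e with b**e <= v, for v >= 1, b >= 2 (repeated floor division)."""
--     e = 0
--     while v >= b:
--         v //= b
--         e += 1
--     return e
--
--
-- def get_possible_values_es(L, R, N):
--     if R == 0:
--         return [[0, 0]] if L == 0 else []
--     if R < 0:
--         return []
--     results = []
--     p5 = 1
--     for x in range(min(N, _ilog(5, R) + 1)):
--         # upper bound: largest y with p5 * 3**y <= R, capped at N - 1
--         y_hi = min(N - 1, _ilog(3, R // p5))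
--         # lower bound: smallest y with p5 * 3**y >= L
--         v = p5
--         y_lo = 0
--         while v < L:
--             v *= 3
--             y_lo += 1
--         for y in range(y_lo, y_hi + 1):
--             results.append([x, y])
--         p5 *= 5
--     return results
-- ===== Notes on version B (the rewrite author's own statement) =====
-- stated objective: alternative
-- what changed: Instead of A's nested scan that tests every candidate product 5**x*3**y with early breaks, B computes for each x the contiguous interval [y_lo, y_hi] of valid y directly: y_hi from an integer-log helper that repeatedly floor-divides R//5**x by 3, y_lo by growing 5**x by factors of 3 until it reaches L, and emits the range without ever forming or testing a product in the emit loop; the outer bound min(N, ilog5(R)+1) is likewise computed up front.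
import Mathlib
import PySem

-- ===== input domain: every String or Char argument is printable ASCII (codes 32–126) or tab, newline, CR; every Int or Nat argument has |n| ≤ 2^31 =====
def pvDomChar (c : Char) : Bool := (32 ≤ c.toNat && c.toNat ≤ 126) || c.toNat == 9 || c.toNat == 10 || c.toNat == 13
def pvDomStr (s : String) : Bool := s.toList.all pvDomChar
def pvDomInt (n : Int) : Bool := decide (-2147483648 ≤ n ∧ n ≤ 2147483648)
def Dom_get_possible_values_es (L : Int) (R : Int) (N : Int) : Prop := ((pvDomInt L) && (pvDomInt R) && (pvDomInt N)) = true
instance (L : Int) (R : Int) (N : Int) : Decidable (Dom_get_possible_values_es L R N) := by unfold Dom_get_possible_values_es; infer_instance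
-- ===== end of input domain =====

-- B replaces A's per-candidate nested scan by per-x interval emission: an integer-log
-- helper (repeated floor division) bounds y above, a growth loop bounds y below, and the
-- contiguous range of valid y is emitted without testing any product; same list, same order.

-- ===== PORT A =====
-- inner 'for y in range(N)' with its two early exits; Python's range is a lazy counter,
-- so the loop is a counter recursion (fuel = iterations left, y = current counter);
-- results is only appended to, so it is returned as ++
def pvInnerA (L R x v5 : Int) : Nat → Int → List (List Int)
  | 0, _ => []
  | n + 1, y =>
    let cv := v5 * 3 ^ y.toNat
    if cv > R then []
    else (if L ≤ cv ∧ cv ≤ R then [[x, y]] else []) ++ pvInnerA L R x v5 n (y + 1)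

-- outer 'for x in range(N)' with its early exit, same counter shape
def pvOuterA (L R N : Int) : Nat → Int → List (List Int)
  | 0, _ => []
  | n + 1, x =>
    let v5 : Int := 5 ^ x.toNat
    if v5 > R then []
    else pvInnerA L R x v5 N.toNat 0 ++ pvOuterA L R N n (x + 1)

def get_possible_values_es (L : Int) (R : Int) (N : Int) : List (List Int) :=
  if R = 0 then (if L = 0 then [[0, 0]] else [])
  else pvOuterA L R N N.toNat 0

-- ===== PORT B =====
-- _ilog(b, v): 'while v >= b: v //= b; e += 1'; well-founded on v.toNat
-- (the '2 ≤ b' conjunct only makes the recursion total; both call sites have b = 3 or 5)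
def pvIlog (b : Int) (v : Int) : Int :=
  if h : 2 ≤ b ∧ b ≤ v then pvIlog b (PySem.Int.floordiv v b) + 1 else 0
termination_by v.toNat
decreasing_by
  have hb : (0:Int) < b := by omega
  have h1 : PySem.Int.floordiv v b < v := (PySem.Int.floordiv_lt_iff_lt_mul hb).mpr (by nlinarith)
  omega

-- 'v = p5; y_lo = 0; while v < L: v *= 3; y_lo += 1'; well-founded on (L - v).toNat
-- (the '1 ≤ v' conjunct only makes the recursion total; at the call site v = 5^x ≥ 1)
def pvYlo (L : Int) (v : Int) (y : Int) : Int :=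
  if h : 1 ≤ v ∧ v < L then pvYlo L (v * 3) (y + 1) else y
termination_by (L - v).toNat
decreasing_by
  have : v + 2 ≤ v * 3 := by nlinarith
  omega

-- outer 'for x in range(min(N, _ilog(5,R)+1))' with accumulator p5; the inner
-- 'for y in range(y_lo, y_hi+1): results.append([x, y])' is the mapped range
def pvOuterB (L R N : Int) : Nat → Int → Int → List (List Int)
  | 0, _, _ => []
  | n + 1, x, p5 =>
    let yhi := min (N - 1) (pvIlog 3 (PySem.Int.floordiv R p5))
    let ylo := pvYlo L p5 0
    ((PySem.List.pyRange ylo (yhi + 1) 1).map (fun y => [x, y])) ++ pvOuterB L R N n (x + 1) (p5 * 5)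

def get_possible_values_es_alt (L : Int) (R : Int) (N : Int) : List (List Int) :=
  if R = 0 then (if L = 0 then [[0, 0]] else [])
  else if R < 0 then []
  else pvOuterB L R N (min N (pvIlog 5 R + 1)).toNat 0 1

-- ===== PRECONDITION & SPEC =====
def Spec_get_possible_values_es (L : Int) (R : Int) (N : Int) (out : List (List Int)) : Prop := out = get_possible_values_es_alt L R N
instance (L : Int) (R : Int) (N : Int) (out : List (List Int)) : Decidable (Spec_get_possible_values_es L R N out) := by unfold Spec_get_possible_values_es; infer_instance

-- ===== CLAIM (what is proved, stated in full; the proofs are below) =====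
def Claim_equal_get_possible_values_es : Prop := ∀ (L : Int) (R : Int) (N : Int), Dom_get_possible_values_es L R N → Spec_get_possible_values_es L R N (get_possible_values_es L R N)

-- ===== LEMMAS AND PROOFS =====

-- monotonicity: c * b^i ≤ c * b^k for i ≤ k, 1 ≤ b, 1 ≤ c
lemma pv_mul_pow_mono (b c : Int) (hb : 1 ≤ b) (hc : 1 ≤ c) {i k : Nat} (h : i ≤ k) :
    c * b ^ i ≤ c * b ^ k := by
  have := pow_le_pow_right₀ hb h
  nlinarith

-- A's inner break loop (counter j, fuel n) equals a flatMap over the Nat range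
lemma pvInnerA_eq (L R x v5 : Int) (hv : 1 ≤ v5) :
    ∀ (n j : Nat),
      pvInnerA L R x v5 n (j : Int) =
        (List.range' j n).flatMap (fun (y : Nat) =>
          if v5 * 3 ^ y ≤ R then
            (if L ≤ v5 * 3 ^ y ∧ v5 * 3 ^ y ≤ R then [[x, (y : Int)]] else [])
          else []) := by
  intro n
  induction n with
  | zero => intro j; simp [pvInnerA, List.range']
  | succ n ih =>
    intro j
    rw [List.range'_succ]
    simp only [List.flatMap_cons, pvInnerA, Int.toNat_natCast]
    by_cases h : v5 * 3 ^ j > R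
    · rw [if_pos h]
      have hnil : (List.range' (j+1) n).flatMap (fun (y : Nat) =>
          if v5 * 3 ^ y ≤ R then
            (if L ≤ v5 * 3 ^ y ∧ v5 * 3 ^ y ≤ R then [[x, (y : Int)]] else [])
          else []) = [] := by
        refine List.flatMap_eq_nil_iff.mpr ?_
        intro y hy
        have hj : j ≤ y := by
          have := (List.mem_range'_1.mp hy).1; omega
        have := pv_mul_pow_mono 3 v5 (by norm_num) hv hj
        rw [if_neg (by omega)]
      rw [hnil, if_neg (show ¬ v5 * 3 ^ j ≤ R by omega)]
      simp
    · rw [if_neg h, if_pos (show v5 * 3 ^ j ≤ R by omega),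
        show (j : Int) + 1 = ((j + 1 : Nat) : Int) by push_cast; ring, ih (j+1)]
      rfl

lemma pvInnerA_eq_zero (L R x v5 : Int) (hv : 1 ≤ v5) (n : Nat) :
    pvInnerA L R x v5 n 0 =
      (List.range' 0 n).flatMap (fun (y : Nat) =>
        if v5 * 3 ^ y ≤ R then
          (if L ≤ v5 * 3 ^ y ∧ v5 * 3 ^ y ≤ R then [[x, (y : Int)]] else [])
        else []) := by
  have := pvInnerA_eq L R x v5 hv n 0
  simpa using this

-- A's outer break loop (counter j, fuel n) equals a flatMap over the Nat range
lemma pvOuterA_eq (L R N : Int) :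
    ∀ (n j : Nat),
      pvOuterA L R N n (j : Int) =
        (List.range' j n).flatMap (fun (xx : Nat) =>
          if (5:Int) ^ xx ≤ R then
            pvInnerA L R (xx : Int) (5 ^ xx) N.toNat 0
          else []) := by
  intro n
  induction n with
  | zero => intro j; simp [pvOuterA, List.range']
  | succ n ih =>
    intro j
    rw [List.range'_succ]
    simp only [List.flatMap_cons, pvOuterA, Int.toNat_natCast]
    by_cases h : (5:Int) ^ j > R
    · rw [if_pos h]
      have hnil : (List.range' (j+1) n).flatMap (fun (xx : Nat) =>
          if (5:Int) ^ xx ≤ R then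
            pvInnerA L R (xx : Int) (5 ^ xx) N.toNat 0
          else []) = [] := by
        refine List.flatMap_eq_nil_iff.mpr ?_
        intro xx hxx
        have hj : j ≤ xx := by
          have := (List.mem_range'_1.mp hxx).1; omega
        have := pv_mul_pow_mono 5 1 (by norm_num) le_rfl hj
        simp only [one_mul] at this
        rw [if_neg (by omega)]
      rw [hnil, if_neg (show ¬ (5:Int) ^ j ≤ R by omega)]
      simp
    · rw [if_neg h, if_pos (show (5:Int) ^ j ≤ R by omega),
        show (j : Int) + 1 = ((j + 1 : Nat) : Int) by push_cast; ring, ih (j+1)]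

lemma pvOuterA_eq_zero (L R N : Int) (n : Nat) :
    pvOuterA L R N n 0 =
      (List.range' 0 n).flatMap (fun (xx : Nat) =>
        if (5:Int) ^ xx ≤ R then
          pvInnerA L R (xx : Int) (5 ^ xx) N.toNat 0
        else []) := by
  have := pvOuterA_eq L R N n 0
  simpa using this

-- pvIlog b v is the integer logarithm: b^(ilog) ≤ v < b^(ilog+1), and it is nonnegative
lemma pvIlog_spec (b v : Int) (hb : 2 ≤ b) (hv : 1 ≤ v) :
    0 ≤ pvIlog b v ∧ b ^ (pvIlog b v).toNat ≤ v ∧ v < b ^ ((pvIlog b v).toNat + 1) := by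
  rw [pvIlog]
  by_cases h : 2 ≤ b ∧ b ≤ v
  · rw [dif_pos h]
    have hbpos : (0:Int) < b := by omega
    have hq1 : (1:Int) ≤ PySem.Int.floordiv v b :=
      (PySem.Int.le_floordiv_iff_mul_le hbpos).mpr (by omega)
    obtain ⟨h0, hlo, hhi⟩ := pvIlog_spec b (PySem.Int.floordiv v b) hb hq1
    set q := PySem.Int.floordiv v b with hqdef
    set e := (pvIlog b q).toNat with hedef
    have htn : (pvIlog b q + 1).toNat = e + 1 := by omega
    have hmod := PySem.Int.floordiv_mul_add_mod v b
    have hm0 : 0 ≤ PySem.Int.mod v b := PySem.Int.mod_nonneg v hbpos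
    have hmlt : PySem.Int.mod v b < b := PySem.Int.mod_lt v hbpos
    refine ⟨by omega, ?_, ?_⟩
    · rw [htn, pow_succ]
      nlinarith
    · rw [htn, pow_succ, pow_succ]
      rw [pow_succ] at hhi
      have hq2 : q ≤ b ^ e * b - 1 := by omega
      nlinarith [mul_le_mul_of_nonneg_right hq2 hbpos.le]
  · rw [dif_neg h]
    norm_num
    omega
termination_by v.toNat
decreasing_by
  have h1 : PySem.Int.floordiv v b < v := (PySem.Int.floordiv_lt_iff_lt_mul (by omega)).mpr (by nlinarith [h.1, h.2])
  omega

-- bracketing corollary: b^n ≤ v ↔ n ≤ ilog b v (for b ≥ 2, v ≥ 1)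
lemma pvIlog_le_iff (b v : Int) (hb : 2 ≤ b) (hv : 1 ≤ v) (n : Nat) :
    b ^ n ≤ v ↔ n ≤ (pvIlog b v).toNat := by
  obtain ⟨h0, hlo, hhi⟩ := pvIlog_spec b v hb hv
  constructor
  · intro hle
    by_contra hgt
    have h1 : (pvIlog b v).toNat + 1 ≤ n := by omega
    have := pv_mul_pow_mono b 1 (by omega) le_rfl h1
    simp only [one_mul] at this
    omega
  · intro hle
    have := pv_mul_pow_mono b 1 (by omega) le_rfl hle
    simp only [one_mul] at this
    omega

-- pvYlo L t y returns the first counter value ≥ y whose running product reaches L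
lemma pvYlo_spec (L t y : Int) (ht : 1 ≤ t) :
    y ≤ pvYlo L t y ∧ L ≤ t * 3 ^ (pvYlo L t y - y).toNat ∧
      (pvYlo L t y = y ∨ t * 3 ^ ((pvYlo L t y - y).toNat - 1) < L) := by
  rw [pvYlo]
  by_cases h : 1 ≤ t ∧ t < L
  · rw [dif_pos h]
    have ht3 : (1:Int) ≤ t * 3 := by nlinarith
    obtain ⟨hge, hlo, hmin⟩ := pvYlo_spec L (t * 3) (y + 1) ht3
    set r := pvYlo L (t * 3) (y + 1) with hrdef
    have hk : (r - y).toNat = (r - (y + 1)).toNat + 1 := by omega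
    refine ⟨by omega, ?_, ?_⟩
    · rw [hk, pow_succ]
      nlinarith
    · right
      rw [hk]
      rcases hmin with heq | hlt
      · have h0 : (r - (y + 1)).toNat = 0 := by omega
        rw [h0]
        simpa using h.2
      · have h1 : (r - (y + 1)).toNat + 1 - 1 = (r - (y + 1)).toNat := by omega
        rw [h1]
        rcases Nat.eq_zero_or_pos ((r - (y + 1)).toNat) with h0 | hpos
        · rw [h0]
          simpa using h.2
        · have h2 : (r - (y + 1)).toNat = ((r - (y + 1)).toNat - 1) + 1 := by omega
          rw [h2, pow_succ]
          nlinarith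
  · rw [dif_neg h]
    refine ⟨le_refl y, ?_, Or.inl rfl⟩
    simp only [sub_self, Int.toNat_zero, pow_zero, mul_one]
    omega
termination_by (L - t).toNat
decreasing_by
  have : t + 2 ≤ t * 3 := by nlinarith [h.1]
  omega

-- bracketing corollary: L ≤ v5 * 3^n ↔ ylo ≤ n (for v5 ≥ 1)
lemma pvYlo_le_iff (L v5 : Int) (hv : 1 ≤ v5) (n : Nat) :
    L ≤ v5 * 3 ^ n ↔ (pvYlo L v5 0).toNat ≤ n := by
  obtain ⟨hge, hlo, hmin⟩ := pvYlo_spec L v5 0 hv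
  simp only [sub_zero] at hlo hmin
  constructor
  · intro hle
    by_contra hgt
    have h1 : n ≤ (pvYlo L v5 0).toNat - 1 := by omega
    rcases hmin with heq | hlt
    · omega
    · have := pv_mul_pow_mono 3 v5 (by norm_num) hv h1
      omega
  · intro hle
    have := pv_mul_pow_mono 3 v5 (by norm_num) hv hle
    omega

-- B's outer loop (counter j, fuel n, accumulator 5^j) as a flatMap over the Nat range
lemma pvOuterB_eq (L R N : Int) :
    ∀ (n j : Nat),
      pvOuterB L R N n (j : Int) (5 ^ j) =
        (List.range' j n).flatMap (fun (xx : Nat) =>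
          (PySem.List.pyRange (pvYlo L (5 ^ xx) 0)
              (min (N - 1) (pvIlog 3 (PySem.Int.floordiv R (5 ^ xx))) + 1) 1).map
            (fun y => [(xx : Int), y])) := by
  intro n
  induction n with
  | zero => intro j; simp [pvOuterB, List.range']
  | succ n ih =>
    intro j
    rw [List.range'_succ]
    simp only [List.flatMap_cons, pvOuterB]
    rw [show (j : Int) + 1 = ((j + 1 : Nat) : Int) by push_cast; ring,
      show (5:Int) ^ j * 5 = 5 ^ (j + 1) by rw [pow_succ], ih (j + 1)]

lemma pvOuterB_eq_zero (L R N : Int) (n : Nat) :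
    pvOuterB L R N n 0 1 =
      (List.range' 0 n).flatMap (fun (xx : Nat) =>
        (PySem.List.pyRange (pvYlo L (5 ^ xx) 0)
            (min (N - 1) (pvIlog 3 (PySem.Int.floordiv R (5 ^ xx))) + 1) 1).map
          (fun y => [(xx : Int), y])) := by
  have := pvOuterB_eq L R N n 0
  simpa using this

-- a mapped Python range with nonnegative start is a mapped Nat range'
lemma pv_pyRange_map {γ : Type} (a : Int) (ha : 0 ≤ a) (b : Int) (g : Int → γ) :
    (PySem.List.pyRange a b 1).map g =
      (List.range' a.toNat (b - a).toNat).map (fun k : Nat => g (k : Int)) := by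
  rw [PySem.List.pyRange_one, List.range'_eq_map_range, List.map_map, List.map_map]
  refine List.map_congr_left ?_
  intro k _
  simp only [Function.comp]
  congr 1
  omega

-- interval emission: filtering a Nat range by an interval membership test is the sub-range
lemma pv_flatMap_interval {γ : Type} (g : Nat → γ) (a m : Nat) :
    ∀ (n : Nat),
      (List.range' 0 n).flatMap (fun y => if a ≤ y ∧ y ≤ m then [g y] else []) =
        (List.range' a (min n (m + 1) - a)).map g := by
  intro n
  induction n with
  | zero => simp [List.range']
  | succ n ih =>
    rw [List.range'_1_concat, List.flatMap_append, ih]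
    simp only [List.flatMap_cons, List.flatMap_nil, List.append_nil, Nat.zero_add]
    by_cases h : a ≤ n ∧ n ≤ m
    · rw [if_pos h]
      have h1 : min (n + 1) (m + 1) - a = (min n (m + 1) - a) + 1 := by omega
      have h2 : a + (min n (m + 1) - a) = n := by omega
      rw [h1, List.range'_1_concat, List.map_append, h2]
      simp
    · rw [if_neg h]
      have h1 : min (n + 1) (m + 1) - a = min n (m + 1) - a := by omega
      rw [h1]
      simp

-- trim: a flatMap guarded by 'x ≤ m' over range' 0 n is the flatMap over the trimmed range
lemma pv_flatMap_trim {γ : Type} (f : Nat → List γ) (m : Nat) :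
    ∀ (n : Nat),
      (List.range' 0 n).flatMap (fun x => if x ≤ m then f x else []) =
        (List.range' 0 (min n (m + 1))).flatMap f := by
  intro n
  induction n with
  | zero => simp
  | succ n ih =>
    rw [List.range'_1_concat, List.flatMap_append, ih]
    simp only [List.flatMap_cons, List.flatMap_nil, List.append_nil, Nat.zero_add]
    by_cases h : n ≤ m
    · rw [if_pos h, show min (n + 1) (m + 1) = min n (m + 1) + 1 by omega,
        List.range'_1_concat, List.flatMap_append, show 0 + min n (m + 1) = n by omega]
      simp
    · rw [if_neg h, show min (n + 1) (m + 1) = min n (m + 1) by omega]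
      simp

-- ===== VERDICT (by name: the statement is the Claim_ definition above) =====
theorem get_possible_values_es_spec : Claim_equal_get_possible_values_es := by
  intro L R N _
  unfold Spec_get_possible_values_es get_possible_values_es get_possible_values_es_alt
  by_cases hR0 : R = 0
  · simp [hR0]
  · rw [if_neg hR0, if_neg hR0]
    by_cases hRneg : R < 0
    · rw [if_pos hRneg]
      rcases Nat.eq_zero_or_pos N.toNat with h | h
      · rw [h]; rfl
      · have hsp : N.toNat = (N.toNat - 1) + 1 := by omega
        rw [hsp]
        simp only [pvOuterA]
        rw [if_pos (by norm_num; omega : (5:Int) ^ (0:Int).toNat > R)]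
    · rw [if_neg hRneg]
      have hR1 : (1:Int) ≤ R := by omega
      obtain ⟨hi5nn, _, _⟩ := pvIlog_spec 5 R (by norm_num) hR1
      set e5 := (pvIlog 5 R).toNat with he5
      have hK : (min N (pvIlog 5 R + 1)).toNat = min N.toNat (e5 + 1) := by omega
      rw [pvOuterA_eq_zero, pvOuterB_eq_zero, hK]
      have hguard : ∀ xx ∈ List.range' 0 N.toNat,
          (if (5:Int) ^ xx ≤ R then pvInnerA L R (xx : Int) (5 ^ xx) N.toNat 0 else []) =
          (if xx ≤ e5 then pvInnerA L R (xx : Int) (5 ^ xx) N.toNat 0 else []) := by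
        intro xx _
        simp only [pvIlog_le_iff 5 R (by norm_num) hR1 xx, he5]
      rw [List.flatMap_congr hguard, pv_flatMap_trim]
      refine List.flatMap_congr ?_
      intro xx hxx
      have hxxK := (List.mem_range'_1.mp hxx).2
      have hN1 : 1 ≤ N := by
        rcases Int.lt_or_le N 1 with h | h
        · exfalso
          have : N.toNat = 0 := by omega
          omega
        · exact h
      have hxle : xx ≤ e5 := by omega
      have hv1 : (1:Int) ≤ 5 ^ xx := one_le_pow₀ (by norm_num)
      have hvR : (5:Int) ^ xx ≤ R := (pvIlog_le_iff 5 R (by norm_num) hR1 xx).mpr hxle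
      set v5 : Int := 5 ^ xx with hv5
      set q : Int := PySem.Int.floordiv R v5 with hq
      have hq1 : (1:Int) ≤ q := (PySem.Int.le_floordiv_iff_mul_le (by omega)).mpr (by omega)
      obtain ⟨hi3nn, _, _⟩ := pvIlog_spec 3 q (by norm_num) hq1
      set e3 := (pvIlog 3 q).toNat with he3
      obtain ⟨hylonn, _, _⟩ := pvYlo_spec L v5 0 hv1
      set yl := pvYlo L v5 0 with hyl
      rw [pvInnerA_eq_zero L R (xx : Int) v5 hv1 N.toNat]
      have hpt : ∀ y ∈ List.range' 0 N.toNat,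
          (if v5 * 3 ^ y ≤ R then
            (if L ≤ v5 * 3 ^ y ∧ v5 * 3 ^ y ≤ R then [[(xx : Int), (y : Int)]] else [])
          else []) =
          (if yl.toNat ≤ y ∧ y ≤ e3 then
            [(fun k : Nat => [(xx : Int), (k : Int)]) y] else []) := by
        intro y _
        have hub : v5 * 3 ^ y ≤ R ↔ y ≤ e3 := by
          rw [mul_comm, ← PySem.Int.le_floordiv_iff_mul_le (show (0:Int) < v5 by omega), ← hq]
          exact pvIlog_le_iff 3 q (by norm_num) hq1 y
        have hlb : L ≤ v5 * 3 ^ y ↔ yl.toNat ≤ y := pvYlo_le_iff L v5 hv1 y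
        simp only [hub, hlb]
        by_cases h1 : y ≤ e3 <;> by_cases h2 : yl.toNat ≤ y <;> simp [h1, h2]
      rw [List.flatMap_congr hpt, pv_flatMap_interval]
      rw [pv_pyRange_map yl hylonn (min (N - 1) (pvIlog 3 q) + 1) (fun y => [(xx : Int), y])]
      congr 2
      omega
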